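-- pv_equiv track=rewrite | github.com/lenaindelaforetmagique/ProjectEuler | Python/PE098.py | convertit
-- ===== SOURCE A (Python) =====
-- def convertit(nb, mot1, mot2):
--     dico1 = {}
--     dico2 = {}
--     strnb = str(nb)
--     for i, c in enumerate(mot1):
--         dico1[c] = strnb[i]
--         dico2[strnb[i]] = c
--
--     if ''.join([dico1[c] for c in mot1]) == strnb:
--         if ''.join([dico2[c] for c in strnb]) == mot1:
--             return int(''.join([dico1[c] for c in mot2]))
--         else:
--             return -1
--     else:
--         return -1
-- ===== SOURCE B (Python) =====
-- def convertit(nb, mot1, mot2):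
--     # Pairwise pattern-isomorphism check instead of two dicts + two validation joins.
--     # Pre_ excludes inputs where A raises (IndexError/KeyError/ValueError); on the
--     # IndexError region (len(mot1) > len(str(nb))) this B returns -1 instead.
--     strnb = str(nb)
--     n = len(mot1)
--     if n != len(strnb):
--         return -1
--     for i in range(n):
--         for j in range(i):
--             if (mot1[i] == mot1[j]) != (strnb[i] == strnb[j]):
--                 return -1
--     return int(''.join(strnb[mot1.index(c)] for c in mot2))
-- ===== Notes on version B (the rewrite author's own statement) =====
-- stated objective: alternative
-- what changed: Replaces A's two hash maps plus two full validation joins by an early length check and a pairwise pattern-isomorphism scan, and reads each result digit directly from str(nb) at the first occurrence index of the character in mot1, with no dictionaries at all.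
-- crash fix: A raises IndexError whenever len(mot1) > len(str(nb)); B's length check returns -1 there. — e.g. on convertit(12, "abc", "a"): A raises IndexError, B returns -1
import Mathlib
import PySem

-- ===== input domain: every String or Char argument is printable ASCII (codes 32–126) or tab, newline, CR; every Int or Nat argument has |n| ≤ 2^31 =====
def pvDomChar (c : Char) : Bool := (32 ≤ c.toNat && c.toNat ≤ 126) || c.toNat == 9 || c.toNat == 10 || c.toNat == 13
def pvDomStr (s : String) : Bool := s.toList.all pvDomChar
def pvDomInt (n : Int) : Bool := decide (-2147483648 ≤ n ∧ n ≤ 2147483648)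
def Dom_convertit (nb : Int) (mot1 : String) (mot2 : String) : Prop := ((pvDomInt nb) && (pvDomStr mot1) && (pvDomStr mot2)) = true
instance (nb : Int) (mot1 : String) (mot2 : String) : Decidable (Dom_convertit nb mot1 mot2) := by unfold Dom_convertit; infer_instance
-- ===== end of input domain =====

-- B drops A's two dicts + two validation joins for a length check, a pairwise
-- pattern-isomorphism scan and first-occurrence digit reads (alternative, not faster).
-- The sentinel ' ' / .getD (-1) totalizations below stand for Python's
-- IndexError / KeyError / ValueError — all excluded by Pre_convertit; they happen
-- to make the two ports agree even outside Pre_, so the equality proof is unconditional.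

-- ===== PORT A =====
def convertit (nb : Int) (mot1 : String) (mot2 : String) : Int :=
  let strnb := PySem.Int.toChars nb
  let pr := (PySem.List.enumerate mot1.toList).foldl
      (fun (d : PySem.Dict Char Char × PySem.Dict Char Char) p =>
        (d.1.insert p.2 (PySem.List.pyGetD strnb p.1 ' '),   -- strnb[i]: IndexError → ' ' (outside Pre_)
         d.2.insert (PySem.List.pyGetD strnb p.1 ' ') p.2))
      (PySem.Dict.empty, PySem.Dict.empty)
  if mot1.toList.map (fun c => pr.1.getD c ' ') = strnb then
    if strnb.map (fun c => pr.2.getD c ' ') = mot1.toList then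
      -- dico1[c]: KeyError → ' '; int(...): ValueError → -1 (both outside Pre_)
      (PySem.Int.ofChars? (mot2.toList.map (fun c => pr.1.getD c ' '))).getD (-1)
    else -1
  else -1

-- ===== PORT B =====
def convertit_alt (nb : Int) (mot1 : String) (mot2 : String) : Int :=
  let strnb := PySem.Int.toChars nb
  let m1 := mot1.toList
  let n := m1.length
  if n ≠ strnb.length then -1
  else if (List.range n).any (fun i => (List.range i).any (fun j =>
        (m1.getD i ' ' == m1.getD j ' ') != (strnb.getD i ' ' == strnb.getD j ' '))) then -1
  else
    -- mot1.index(c): ValueError → index n, hence sentinel ' '; int(...): ValueError → -1 (outside Pre_)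
    (PySem.Int.ofChars? (mot2.toList.map
        (fun c => strnb.getD ((PySem.List.index? m1 c).getD n) ' '))).getD (-1)

-- ===== PRECONDITION & SPEC =====
-- Pre_ excludes exactly the inputs on which Python A raises: IndexError when
-- len(mot1) > len(str(nb)); and, when the substitution is a clean bijection (so the
-- int(...) line is reached), KeyError for a mot2 char absent from mot1 and ValueError
-- for int('') or a '-' digit placed anywhere but alone at the head of the result.
def Pre_convertit (nb : Int) (mot1 : String) (mot2 : String) : Prop :=
  let s := PySem.Int.toChars nb
  let m1 := mot1.toList
  let m2 := mot2.toList
  m1.length ≤ s.length ∧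
  ((m1.length = s.length ∧ ∀ i < m1.length, ∀ j < m1.length,
      (m1.getD i ' ' = m1.getD j ' ' ↔ s.getD i ' ' = s.getD j ' ')) →
    m2 ≠ [] ∧ m2.all (fun c => m1.contains c) = true ∧
    (nb < 0 → m1.getD 0 ' ' ∉ m2 ∨
      (m2.getD 0 ' ' = m1.getD 0 ' ' ∧ m1.getD 0 ' ' ∉ m2.tail ∧ 2 ≤ m2.length)))
instance (nb : Int) (mot1 : String) (mot2 : String) : Decidable (Pre_convertit nb mot1 mot2) := by
  unfold Pre_convertit; infer_instance

def pvWitness_convertit : Int × String × String := (123, "abc", "cab")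

-- A raises IndexError whenever len(mot1) > len(str(nb)); B's length check returns -1 there.
def Raises_convertit (nb : Int) (mot1 : String) (mot2 : String) : Prop :=
  (PySem.Int.toChars nb).length < mot1.toList.length
instance (nb : Int) (mot1 : String) (mot2 : String) : Decidable (Raises_convertit nb mot1 mot2) := by
  unfold Raises_convertit; infer_instance
def pvRaiseWitness_convertit : Int × String × String := (12, "abc", "a")
def pvRaiseWitnessOut_convertit : Int := -1

def Spec_convertit (nb : Int) (mot1 : String) (mot2 : String) (out : Int) : Prop := out = convertit_alt nb mot1 mot2
instance (nb : Int) (mot1 : String) (mot2 : String) (out : Int) : Decidable (Spec_convertit nb mot1 mot2 out) := by unfold Spec_convertit; infer_instance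

-- ===== CLAIM (what is proved, stated in full; the proofs are below) =====
def Claim_equal_convertit : Prop := ∀ (nb : Int) (mot1 : String) (mot2 : String), Dom_convertit nb mot1 mot2 → Pre_convertit nb mot1 mot2 → Spec_convertit nb mot1 mot2 (convertit nb mot1 mot2)

def Claim_raises_convertit : Prop := (∀ (nb : Int) (mot1 : String) (mot2 : String), Dom_convertit nb mot1 mot2 → Raises_convertit nb mot1 mot2 → ¬ Pre_convertit nb mot1 mot2) ∧ (Dom_convertit (pvRaiseWitness_convertit.1) (pvRaiseWitness_convertit.2.1) (pvRaiseWitness_convertit.2.2) ∧ Raises_convertit (pvRaiseWitness_convertit.1) (pvRaiseWitness_convertit.2.1) (pvRaiseWitness_convertit.2.2) ∧ convertit_alt (pvRaiseWitness_convertit.1) (pvRaiseWitness_convertit.2.1) (pvRaiseWitness_convertit.2.2) = pvRaiseWitnessOut_convertit)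

-- ===== LEMMAS AND PROOFS =====

-- last-written value for a key after a fold of dict inserts over a pair list
def lastv (l : List (Char × Char)) (k : Char) (dflt : Char) : Char :=
  ((l.reverse.find? (fun p => p.1 == k)).map Prod.snd).getD dflt

theorem getD_foldl_insert_pairs (l : List (Char × Char)) (d : PySem.Dict Char Char)
    (k dflt : Char) :
    (l.foldl (fun d p => d.insert p.1 p.2) d).getD k dflt =
      ((l.reverse.find? (fun p => p.1 == k)).map Prod.snd).getD (d.getD k dflt) := by
  induction l using List.reverseRecOn generalizing d with
  | nil => simp
  | append_singleton l p ih =>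
    rw [List.foldl_append]
    simp only [List.foldl_cons, List.foldl_nil, List.reverse_append, List.reverse_singleton,
      List.singleton_append, List.find?_cons]
    rw [PySem.Dict.getD_insert]
    by_cases h : k = p.1
    · simp [h]
    · have : (p.1 == k) = false := by simp [Ne.symm h]
      simp [this, h, ih]

theorem mem_zip_index {α β : Type} {l : List α} {l' : List β} {p : α × β}
    (h : p ∈ l.zip l') : ∃ i, ∃ h1 : i < l.length, ∃ h2 : i < l'.length, p = (l[i], l'[i]) := by
  obtain ⟨i, hi, hp⟩ := List.getElem_of_mem h
  have h1 : i < l.length := lt_of_lt_of_le hi (by simp [List.length_zip])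
  have h2 : i < l'.length := lt_of_lt_of_le hi (by simp [List.length_zip])
  exact ⟨i, h1, h2, by rw [← hp, List.getElem_zip]⟩

theorem lastv_zip_mem {u v : List Char} (h : u.length = v.length) {c : Char}
    (hc : c ∈ u) (d : Char) :
    ∃ j, j < u.length ∧ u.getD j ' ' = c ∧ lastv (u.zip v) c d = v.getD j ' ' := by
  obtain ⟨i, hi, hui⟩ := List.getElem_of_mem hc
  have hmemz : (c, v[i]'(h ▸ hi)) ∈ (u.zip v).reverse := by
    rw [List.mem_reverse]
    have : (u.zip v)[i]'(by simp [List.length_zip]; omega) = (c, v[i]'(h ▸ hi)) := by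
      rw [List.getElem_zip]; simp [hui]
    exact this ▸ List.getElem_mem _
  have hsome : ((u.zip v).reverse.find? (fun p => p.1 == c)).isSome := by
    rw [List.find?_isSome]
    exact ⟨_, hmemz, by simp⟩
  obtain ⟨p, hp⟩ := Option.isSome_iff_exists.mp hsome
  have hpmem : p ∈ u.zip v := List.mem_reverse.mp (List.mem_of_find?_eq_some hp)
  have hpk : p.1 = c := by simpa using List.find?_some hp
  obtain ⟨j, hj1, hj2, hpj⟩ := mem_zip_index hpmem
  refine ⟨j, hj1, ?_, ?_⟩
  · rw [List.getD_eq_getElem _ _ hj1]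
    rw [hpj] at hpk; exact hpk
  · unfold lastv
    rw [hp]
    simp [hpj, List.getElem?_eq_getElem hj2]

theorem lastv_zip_not_mem {u v : List Char} {c : Char} (hc : c ∉ u) (d : Char) :
    lastv (u.zip v) c d = d := by
  unfold lastv
  rw [List.find?_eq_none.mpr]
  · rfl
  · intro p hp hbeq
    obtain ⟨j, hj1, hj2, hpj⟩ := mem_zip_index (List.mem_reverse.mp hp)
    have hpc : p.1 = c := by simpa using hbeq
    apply hc
    rw [← hpc, hpj]
    exact List.getElem_mem _

-- enumerate-map to zip, under equal lengths
theorem enumMap_fst_eq_zip {u v : List Char} (h : u.length = v.length) :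
    (PySem.List.enumerate u).map (fun p => (p.2, PySem.List.pyGetD v p.1 ' ')) = u.zip v := by
  apply List.ext_getElem
  · simp [PySem.List.length_enumerate, List.length_zip, h]
  · intro k h1 h2
    simp only [List.getElem_map, PySem.List.getElem_enumerate, List.getElem_zip]
    have hk : k < u.length := by simpa [PySem.List.length_enumerate] using h1
    simp [List.getElem?_eq_getElem (h ▸ hk)]

theorem enumMap_snd_eq_zip {u v : List Char} (h : u.length = v.length) :
    (PySem.List.enumerate u).map (fun p => (PySem.List.pyGetD v p.1 ' ', p.2)) = v.zip u := by
  apply List.ext_getElem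
  · simp [PySem.List.length_enumerate, List.length_zip, h]
  · intro k h1 h2
    simp only [List.getElem_map, PySem.List.getElem_enumerate, List.getElem_zip]
    have hk : k < u.length := by simpa [PySem.List.length_enumerate] using h1
    simp [List.getElem?_eq_getElem (h ▸ hk)]

theorem scan_false_iff (m1 s : List Char) :
    (((List.range m1.length).any (fun i => (List.range i).any (fun j =>
        (m1.getD i ' ' == m1.getD j ' ') != (s.getD i ' ' == s.getD j ' ')))) = false)
    ↔ ∀ i < m1.length, ∀ j < i, (m1.getD i ' ' = m1.getD j ' ' ↔ s.getD i ' ' = s.getD j ' ') := by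
  simp only [List.any_eq_false, List.any_eq_true, List.mem_range, not_exists, not_and]
  constructor
  · intro h i hi j hj
    have h2 := h i hi j hj
    rw [Bool.not_eq_true, bne_eq_false_iff_eq] at h2
    have h3 := Bool.eq_iff_iff.mp h2
    simp only [beq_iff_eq] at h3
    exact h3
  · intro h i hi j hj
    have h2 := h i hi j hj
    rw [Bool.not_eq_true, bne_eq_false_iff_eq]
    apply Bool.eq_iff_iff.mpr
    simp only [beq_iff_eq]
    exact h2

-- the two ports agree on every input (the sentinel totalizations coincide outside Pre_ too)
theorem main_eq (nb : Int) (mot1 : String) (mot2 : String) :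
    convertit nb mot1 mot2 = convertit_alt nb mot1 mot2 := by
  unfold convertit convertit_alt
  dsimp only
  set s := PySem.Int.toChars nb with hs
  set m1 := mot1.toList with hm1
  set m2 := mot2.toList with hm2
  by_cases hn : m1.length = s.length
  case neg =>
    have hA : ∀ f : Char → Char, m1.map f ≠ s := by
      intro f h
      exact hn (by simpa using congrArg List.length h)
    simp only [if_neg (hA _), if_pos hn]
  case pos =>
    -- split the two-dict fold and characterize lookups
    have hsplit : (PySem.List.enumerate m1).foldl
        (fun (d : PySem.Dict Char Char × PySem.Dict Char Char) (p : Int × Char) =>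
          (d.1.insert p.2 (PySem.List.pyGetD s p.1 ' '),
           d.2.insert (PySem.List.pyGetD s p.1 ' ') p.2))
        (PySem.Dict.empty, PySem.Dict.empty)
      = ((PySem.List.enumerate m1).foldl
          (fun (d : PySem.Dict Char Char) (p : Int × Char) => d.insert p.2 (PySem.List.pyGetD s p.1 ' '))
          PySem.Dict.empty,
         (PySem.List.enumerate m1).foldl
          (fun (d : PySem.Dict Char Char) (p : Int × Char) => d.insert (PySem.List.pyGetD s p.1 ' ') p.2)
          PySem.Dict.empty) :=
      PySem.List.foldl_prod_mk
        (f := fun (d : PySem.Dict Char Char) (p : Int × Char) => d.insert p.2 (PySem.List.pyGetD s p.1 ' '))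
        (g := fun (d : PySem.Dict Char Char) (p : Int × Char) => d.insert (PySem.List.pyGetD s p.1 ' ') p.2)
        _ _ _
    rw [hsplit]
    have e1 : ∀ c : Char,
        ((PySem.List.enumerate m1).foldl
          (fun (d : PySem.Dict Char Char) (p : Int × Char) => d.insert p.2 (PySem.List.pyGetD s p.1 ' '))
          PySem.Dict.empty).getD c ' ' = lastv (m1.zip s) c ' ' := by
      intro c
      rw [← List.foldl_map (f := fun (p : Int × Char) => (p.2, PySem.List.pyGetD s p.1 ' '))
            (g := fun (d : PySem.Dict Char Char) q => d.insert q.1 q.2)]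
      rw [enumMap_fst_eq_zip hn, getD_foldl_insert_pairs]
      simp [lastv, PySem.Dict.getD_empty]
    have e2 : ∀ c : Char,
        ((PySem.List.enumerate m1).foldl
          (fun (d : PySem.Dict Char Char) (p : Int × Char) => d.insert (PySem.List.pyGetD s p.1 ' ') p.2)
          PySem.Dict.empty).getD c ' ' = lastv (s.zip m1) c ' ' := by
      intro c
      rw [← List.foldl_map (f := fun (p : Int × Char) => (PySem.List.pyGetD s p.1 ' ', p.2))
            (g := fun (d : PySem.Dict Char Char) q => d.insert q.1 q.2)]
      rw [enumMap_snd_eq_zip hn, getD_foldl_insert_pairs]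
      simp [lastv, PySem.Dict.getD_empty]
    simp only [e1, e2]
    by_cases hiso : ∀ i < m1.length, ∀ j < m1.length,
        (m1.getD i ' ' = m1.getD j ' ' ↔ s.getD i ' ' = s.getD j ' ')
    case pos =>
      have hscan : ((List.range m1.length).any (fun i => (List.range i).any (fun j =>
          (m1.getD i ' ' == m1.getD j ' ') != (s.getD i ' ' == s.getD j ' ')))) = false :=
        (scan_false_iff m1 s).mpr (fun i hi j hj => hiso i hi j (hj.trans hi))
      have hc1 : m1.map (fun c => lastv (m1.zip s) c ' ') = s := by
        apply List.ext_getElem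
        · simp [hn]
        · intro k h1 h2
          simp only [List.getElem_map]
          have hk : k < m1.length := by simpa using h1
          obtain ⟨j, hj, hjc, hl⟩ := lastv_zip_mem hn (List.getElem_mem hk) ' '
          rw [hl]
          have hgd : m1.getD j ' ' = m1.getD k ' ' := by
            rw [hjc, List.getD_eq_getElem _ _ hk]
          have hs' := (hiso j hj k hk).mp hgd
          rw [List.getD_eq_getElem _ _ (hn ▸ hj), List.getD_eq_getElem _ _ (hn ▸ hk)] at hs'
          rw [List.getD_eq_getElem _ _ (hn ▸ hj)]
          exact hs'
      have hc2 : s.map (fun c => lastv (s.zip m1) c ' ') = m1 := by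
        apply List.ext_getElem
        · simp [hn]
        · intro k h1 h2
          simp only [List.getElem_map]
          have hk : k < s.length := by simpa using h1
          have hk1 : k < m1.length := by omega
          obtain ⟨j, hj, hjc, hl⟩ := lastv_zip_mem hn.symm (List.getElem_mem hk) ' '
          rw [hl]
          have hj1 : j < m1.length := by omega
          have hgd : s.getD j ' ' = s.getD k ' ' := by
            rw [hjc, List.getD_eq_getElem _ _ hk]
          have hm' := (hiso j hj1 k hk1).mpr hgd
          rw [List.getD_eq_getElem _ _ hj1, List.getD_eq_getElem _ _ hk1] at hm'
          rw [List.getD_eq_getElem _ _ hj1]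
          exact hm'
      have hmap : (fun c => lastv (m1.zip s) c ' ')
          = fun c => s.getD ((PySem.List.index? m1 c).getD m1.length) ' ' := by
        funext c
        by_cases hc : c ∈ m1
        · obtain ⟨k, hk⟩ := Option.isSome_iff_exists.mp
            ((PySem.List.index?_isSome_iff _ _).mpr hc)
          obtain ⟨hk1, hk2, -⟩ := PySem.List.getElem_of_index?_eq_some hk
          obtain ⟨j, hj, hjc, hl⟩ := lastv_zip_mem hn hc ' '
          rw [hl, hk]
          simp only [Option.getD_some]
          have hgd : m1.getD j ' ' = m1.getD k ' ' := by
            rw [hjc, List.getD_eq_getElem _ _ hk1, hk2]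
          exact (hiso j hj k hk1).mp hgd
        · rw [lastv_zip_not_mem hc, (PySem.List.index?_eq_none_iff _ _).mpr hc]
          rw [Option.getD_none, hn, List.getD_eq_default _ _ le_rfl]
      rw [if_pos hc1, if_pos hc2, if_neg (not_not_intro hn), hscan, hmap]
      simp
    case neg =>
      have hscan : ((List.range m1.length).any (fun i => (List.range i).any (fun j =>
          (m1.getD i ' ' == m1.getD j ' ') != (s.getD i ' ' == s.getD j ' ')))) = true := by
        by_contra hfalse
        rw [Bool.not_eq_true] at hfalse
        apply hiso
        have tri := (scan_false_iff m1 s).mp hfalse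
        intro i hi j hj
        rcases Nat.lt_trichotomy i j with h | h | h
        · have := tri j hj i h
          constructor
          · intro he; exact ((this.mp he.symm)).symm
          · intro he; exact ((this.mpr he.symm)).symm
        · subst h; simp
        · exact tri i hi j h
      rw [hscan]
      have hpt : ∀ (u v : List Char), u.length = v.length →
          u.map (fun c => lastv (u.zip v) c ' ') = v →
          ∀ k < u.length, lastv (u.zip v) (u.getD k ' ') ' ' = v.getD k ' ' := by
        intro u v hlen hmapeq k hk
        have := congrArg (fun l => l[k]?) hmapeq
        simp only [List.getElem?_map, List.getElem?_eq_getElem hk,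
          List.getElem?_eq_getElem (hlen ▸ hk), Option.map_some] at this
        rw [List.getD_eq_getElem _ _ hk, List.getD_eq_getElem _ _ (hlen ▸ hk)]
        simpa using this
      by_cases hc1 : m1.map (fun c => lastv (m1.zip s) c ' ') = s
      · have hc2 : ¬ (s.map (fun c => lastv (s.zip m1) c ' ') = m1) := by
          intro hc2
          apply hiso
          intro i hi j hj
          have hpt1 := hpt m1 s hn hc1
          have hpt2 := hpt s m1 hn.symm hc2
          constructor
          · intro he
            have := hpt1 i hi
            rw [he, hpt1 j hj] at this
            exact this.symm
          · intro he
            have := hpt2 i (hn ▸ hi)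
            rw [he, hpt2 j (hn ▸ hj)] at this
            exact this.symm
        rw [if_pos hc1, if_neg hc2]
        simp
      · rw [if_neg hc1]
        simp

-- ===== VERDICT (by name: the statement is the Claim_ definition above) =====
theorem convertit_spec : Claim_equal_convertit := by
  intro nb mot1 mot2 _ _
  unfold Spec_convertit
  exact main_eq nb mot1 mot2

def convertit_raises : Claim_raises_convertit := by
  unfold Claim_raises_convertit
  refine ⟨?_, by decide⟩
  intro nb mot1 mot2 _ hr hpre
  exact absurd hpre.1 (not_le.2 hr)
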